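-- pv_equiv track=rewrite | github.com/blzzua/codewars | 6-kyu/simple_fun_122_string_constructing.py | string_constructing
-- ===== SOURCE A (Python) =====
-- def string_constructing(a, s):
--     res = 0
--     start = list(a)
--     finish = list(s)
--     while finish:
--         res = res + len(start) + 1
--         for start_letter in start:
--             if start_letter  == finish[0]:
--                 finish.pop(0)
--                 res = res - 1
--                 if finish == []:
--                     break
--     return res
-- ===== SOURCE B (Python) =====
-- def string_constructing(a, s):
--     # One walk over s with a moving 'rest' suffix of a, then a closed form:
--     # res = passes * (len(a) + 1) - len(s).
--     if not s:
--         return 0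
--     passes = 1
--     rest = a
--     for c in s:
--         j = rest.find(c)
--         if j == -1:
--             passes += 1
--             j = a.find(c)
--             rest = a[j + 1:]
--         else:
--             rest = rest[j + 1:]
--     return passes * (len(a) + 1) - len(s)
-- ===== Notes on version B (the rewrite author's own statement) =====
-- stated objective: faster
-- what changed: Replaces A's repeated full scans of a with pop(0) on a list copy of s by a single walk over s that keeps a moving suffix of a via str.find, then returns the closed form passes*(len(a)+1)-len(s).
-- outside the precondition, e.g. on string_constructing('ab', 'abc'): A does not finish within the time limit, B returns 3
import Mathlib
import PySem

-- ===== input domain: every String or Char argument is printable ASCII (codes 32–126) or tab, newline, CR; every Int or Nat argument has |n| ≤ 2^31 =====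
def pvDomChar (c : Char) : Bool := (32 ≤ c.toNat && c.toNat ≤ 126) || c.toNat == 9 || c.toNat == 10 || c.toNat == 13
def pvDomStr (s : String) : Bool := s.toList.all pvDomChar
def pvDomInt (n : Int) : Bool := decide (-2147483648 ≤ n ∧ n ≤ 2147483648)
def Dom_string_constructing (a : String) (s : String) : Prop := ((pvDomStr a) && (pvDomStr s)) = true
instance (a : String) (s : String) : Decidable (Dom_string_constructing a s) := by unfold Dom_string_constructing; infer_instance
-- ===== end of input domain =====

-- B replaces A's repeated scans of `a` with pops from `finish` by a single walk over `s`
-- keeping a suffix of `a`, returning the closed form passes*(len(a)+1)-len(s); same value on Pre_.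

-- ===== PORT A =====
-- inner `for start_letter in start` loop; the `[]` clause is Python's `if finish == []: break`
def pvInnerA : List Char → Int → List Char → Int × List Char
  | _, res, [] => (res, [])
  | [], res, f0 :: ft => (res, f0 :: ft)
  | x :: xs, res, f0 :: ft =>
      if x = f0 then pvInnerA xs (res - 1) ft else pvInnerA xs res (f0 :: ft)

-- the `while finish:` loop; fuel = len(s) suffices on Pre_ (each pass consumes ≥ 1 char);
-- Python diverges exactly where the fuel could run out, and those inputs are outside Pre_
def pvWhileA (start : List Char) : Nat → Int → List Char → Int
  | _, res, [] => res
  | 0, res, _ :: _ => res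
  | fuel + 1, res, f0 :: ft =>
      let p := pvInnerA start (res + (start.length : Int) + 1) (f0 :: ft)
      pvWhileA start fuel p.1 p.2

def string_constructing (a : String) (s : String) : Int :=
  pvWhileA a.toList s.toList.length 0 s.toList

-- ===== PORT B =====
-- one step of B's `for c in s` loop over the state (passes, rest)
def pvStepB (al : List Char) (st : Int × List Char) (c : Char) : Int × List Char :=
  let j := PySem.Chars.find st.2 [c]
  if j = -1 then
    let j2 := PySem.Chars.find al [c]
    (st.1 + 1, PySem.List.slice al (some (j2 + 1)) none)
  else
    (st.1, PySem.List.slice st.2 (some (j + 1)) none)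

def string_constructing_alt (a : String) (s : String) : Int :=
  if s.toList = [] then 0
  else
    let al := a.toList
    let fin := s.toList.foldl (pvStepB al) (1, al)
    fin.1 * ((al.length : Int) + 1) - (s.toList.length : Int)

-- ===== PRECONDITION & SPEC =====
-- A terminates exactly when every character of s occurs in a; otherwise its while loop never ends.
def Pre_string_constructing (a : String) (s : String) : Prop :=
  (s.toList.all (fun c => a.toList.contains c)) = true
instance (a : String) (s : String) : Decidable (Pre_string_constructing a s) := by
  unfold Pre_string_constructing; infer_instance

def pvWitness_string_constructing : String × String := ("ab", "abab")

def Spec_string_constructing (a : String) (s : String) (out : Int) : Prop := out = string_constructing_alt a s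
instance (a : String) (s : String) (out : Int) : Decidable (Spec_string_constructing a s out) := by unfold Spec_string_constructing; infer_instance

-- ===== CLAIM (what is proved, stated in full; the proofs are below) =====
def Claim_equal_string_constructing : Prop := ∀ (a : String) (s : String), Dom_string_constructing a s → Pre_string_constructing a s → Spec_string_constructing a s (string_constructing a s)

-- ===== LEMMAS AND PROOFS =====

-- chars matched in one greedy pass of `rem` against prefix of `f`
def pvCnt : List Char → List Char → Nat
  | _, [] => 0
  | [], _ :: _ => 0
  | x :: xs, f0 :: ft => if x = f0 then pvCnt xs ft + 1 else pvCnt xs (f0 :: ft)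

-- suffix of l after the first occurrence of c
def pvAfter (c : Char) : List Char → List Char
  | [] => []
  | x :: xs => if x = c then xs else pvAfter c xs

-- number of pass restarts needed to consume f, starting mid-pass with suffix rest of al
def pvSpec (al : List Char) : List Char → List Char → Nat
  | [], _ => 0
  | c :: ft, rest =>
      if c ∈ rest then pvSpec al ft (pvAfter c rest) else pvSpec al ft (pvAfter c al) + 1

theorem pvInnerA_eq (rem : List Char) : ∀ (f : List Char) (res : Int),
    pvInnerA rem res f = (res - pvCnt rem f, f.drop (pvCnt rem f)) := by
  induction rem with
  | nil => intro f res; cases f <;> simp [pvInnerA, pvCnt]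
  | cons x xs ih =>
      intro f res
      cases f with
      | nil => simp [pvInnerA, pvCnt]
      | cons f0 ft =>
          by_cases h : x = f0 <;> simp [pvInnerA, pvCnt, h, ih] <;> try ring_nf

theorem pvCnt_cons_mem {c : Char} {rest : List Char} (h : c ∈ rest) (ft : List Char) :
    pvCnt rest (c :: ft) = pvCnt (pvAfter c rest) ft + 1 := by
  induction rest with
  | nil => cases h
  | cons x xs ih =>
      by_cases hx : x = c
      · subst hx; simp [pvCnt, pvAfter]
      · have : c ∈ xs := by
          cases h with
          | head => exact absurd rfl hx
          | tail _ h' => exact h'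
        simp [pvCnt, pvAfter, hx, ih this]

theorem pvCnt_cons_not_mem {c : Char} {rest : List Char} (h : c ∉ rest) (ft : List Char) :
    pvCnt rest (c :: ft) = 0 := by
  induction rest with
  | nil => simp [pvCnt]
  | cons x xs ih =>
      have hx : x ≠ c := fun he => h (he ▸ List.mem_cons_self)
      have : c ∉ xs := fun hc => h (List.mem_cons_of_mem _ hc)
      simp [pvCnt, hx, ih this]

theorem pvCnt_le (f : List Char) : ∀ rest : List Char, pvCnt rest f ≤ f.length := by
  induction f with
  | nil => intro rest; cases rest <;> simp [pvCnt]
  | cons c ft ih =>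
      intro rest
      induction rest with
      | nil => simp [pvCnt]
      | cons x xs ihr =>
          by_cases hx : x = c
          · simp only [pvCnt, if_pos hx, List.length_cons]
            exact Nat.add_le_add_right (ih xs) 1
          · simpa only [pvCnt, if_neg hx] using ihr

-- per-pass decomposition of pvSpec
theorem pvSpec_pass (al : List Char) : ∀ (f rest : List Char), f ≠ [] → (∀ c ∈ f, c ∈ al) →
    pvSpec al f rest =
      if pvCnt rest f = f.length then 0 else pvSpec al (f.drop (pvCnt rest f)) al + 1 := by
  intro f
  induction f with
  | nil => intro rest h; exact absurd rfl h
  | cons c ft ih =>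
      intro rest _ hall
      have hca : c ∈ al := hall c List.mem_cons_self
      by_cases hc : c ∈ rest
      · rw [pvCnt_cons_mem hc ft]
        cases ft with
        | nil => simp [pvSpec, hc, pvCnt]
        | cons g gt =>
            have hall' : ∀ x ∈ g :: gt, x ∈ al := fun x hx => hall x (List.mem_cons_of_mem _ hx)
            have hih := ih (pvAfter c rest) (by simp) hall'
            have hL : pvSpec al (c :: g :: gt) rest = pvSpec al (g :: gt) (pvAfter c rest) := by
              simp [pvSpec, hc]
            rw [hL, hih]
            by_cases he : pvCnt (pvAfter c rest) (g :: gt) = (g :: gt).length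
            · rw [if_pos he, if_pos (by simp only [List.length_cons] at he ⊢; omega)]
            · rw [if_neg he, if_neg (by simp only [List.length_cons] at he ⊢; omega),
                  List.drop_succ_cons]
      · have h0 : pvCnt rest (c :: ft) = 0 := pvCnt_cons_not_mem hc ft
        rw [h0, if_neg (by simp), List.drop_zero]
        have h1 : pvSpec al (c :: ft) rest = pvSpec al ft (pvAfter c al) + 1 := by
          simp [pvSpec, hc]
        have h2 : pvSpec al (c :: ft) al = pvSpec al ft (pvAfter c al) := by
          simp [pvSpec, hca]
        rw [h1, h2]

theorem pvCnt_pos {c : Char} {al : List Char} (h : c ∈ al) (ft : List Char) :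
    1 ≤ pvCnt al (c :: ft) := by
  rw [pvCnt_cons_mem h ft]; omega

-- A's while loop in closed form
theorem pvWhileA_eq (al : List Char) : ∀ (fuel : Nat) (f : List Char) (res : Int),
    (∀ c ∈ f, c ∈ al) → f.length ≤ fuel →
    pvWhileA al fuel res f =
      res + (if f = [] then 0 else ((pvSpec al f al : Int) + 1)) * ((al.length : Int) + 1)
          - (f.length : Int) := by
  intro fuel
  induction fuel with
  | zero =>
      intro f res _ hlen
      have : f = [] := List.length_eq_zero_iff.mp (Nat.le_zero.mp hlen)
      subst this; simp [pvWhileA]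
  | succ fuel ih =>
      intro f res hall hlen
      cases f with
      | nil => simp [pvWhileA]
      | cons f0 ft =>
          have hf0 : f0 ∈ al := hall f0 List.mem_cons_self
          set f := f0 :: ft with hf
          have hkpos : 1 ≤ pvCnt al f := pvCnt_pos hf0 ft
          have hkle : pvCnt al f ≤ f.length := pvCnt_le f al
          have hall' : ∀ c ∈ f.drop (pvCnt al f), c ∈ al :=
            fun c hc => hall c (List.mem_of_mem_drop hc)
          have hlen' : (f.drop (pvCnt al f)).length ≤ fuel := by
            simp only [List.length_drop]
            have : f.length ≤ fuel + 1 := hlen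
            omega
          have hstep : pvWhileA al (fuel + 1) res f =
              pvWhileA al fuel (res + (al.length : Int) + 1 - pvCnt al f) (f.drop (pvCnt al f)) := by
            rw [hf]
            show pvWhileA al (fuel+1) res (f0 :: ft) = _
            simp only [pvWhileA, pvInnerA_eq, ← hf]
          have hfne : f ≠ [] := by simp [hf]
          rw [hstep, ih _ _ hall' hlen', if_neg hfne]
          have hpass := pvSpec_pass al f al hfne hall
          by_cases hend : pvCnt al f = f.length
          · have hnil : f.drop (pvCnt al f) = [] := by rw [hend]; exact List.drop_length
            have hc : (pvCnt al f : Int) = (f.length : Int) := by exact_mod_cast hend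
            rw [hpass, if_pos hend, hnil]
            simp only [reduceIte, List.length_nil]
            push_cast
            linarith [hc]
          · have hnnil : f.drop (pvCnt al f) ≠ [] := by
              intro hcon
              have := congrArg List.length hcon
              simp only [List.length_drop, List.length_nil] at this
              omega
            rw [hpass, if_neg hend, if_neg hnnil]
            simp only [List.length_drop]
            push_cast [Nat.cast_sub hkle]
            ring

-- [c] is a prefix of t iff t starts with c
theorem pvSingleton_prefix {c : Char} {t : List Char} : [c] <+: t ↔ t.head? = some c := by
  cases t with
  | nil => simp
  | cons x xs =>
      constructor
      · rintro ⟨u, hu⟩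
        simp only [List.singleton_append] at hu
        cases hu; rfl
      · intro h
        simp only [List.head?_cons, Option.some.injEq] at h
        exact ⟨xs, by simp [h]⟩

theorem pvSingleton_infix {c : Char} {l : List Char} : [c] <:+: l ↔ c ∈ l := by
  constructor
  · intro h; exact (List.infix_iff_prefix_suffix.mp h).elim
      (fun t ⟨hp, hs⟩ => hs.subset (hp.subset List.mem_cons_self))
  · intro h
    obtain ⟨p, q, hpq⟩ := List.append_of_mem h
    exact ⟨p, q, by simp [hpq]⟩

theorem pvDrop_first (c : Char) : ∀ (l : List Char) (j : Nat),
    (l.drop j).head? = some c → (∀ i < j, (l.drop i).head? ≠ some c) →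
    l.drop (j + 1) = pvAfter c l := by
  intro l
  induction l with
  | nil => intro j h _; simp at h
  | cons x xs ih =>
      intro j h hmin
      cases j with
      | zero =>
          simp only [List.drop_zero, List.head?_cons, Option.some.injEq] at h
          subst h
          simp [pvAfter]
      | succ j =>
          have hx : x ≠ c := by
            intro he
            exact hmin 0 (Nat.succ_pos j) (by simp [he])
          have hmin' : ∀ i < j, (xs.drop i).head? ≠ some c := by
            intro i hi hcon
            exact hmin (i + 1) (Nat.succ_lt_succ hi) (by simpa using hcon)
          have h' : (xs.drop j).head? = some c := by simpa using h
          simp only [List.drop_succ_cons, pvAfter, if_neg hx]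
          exact ih j h' hmin'

theorem pvFind_not_mem {c : Char} {l : List Char} (h : c ∉ l) :
    PySem.Chars.find l [c] = -1 := by
  rw [PySem.Chars.find_eq_neg_one_iff]
  rw [pvSingleton_infix]
  exact h

theorem pvFind_mem {c : Char} {l : List Char} (h : c ∈ l) :
    PySem.List.slice l (some (PySem.Chars.find l [c] + 1)) none = pvAfter c l ∧
    PySem.Chars.find l [c] ≠ -1 := by
  have hinf : [c] <:+: l := pvSingleton_infix.mpr h
  have hnn : 0 ≤ PySem.Chars.find l [c] := (PySem.Chars.find_nonneg_iff l [c]).mpr hinf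
  obtain ⟨hpre, hmin⟩ := PySem.Chars.find_spec (s := l) (sub := [c]) hnn
  refine ⟨?_, by omega⟩
  have h1 : 0 ≤ PySem.Chars.find l [c] + 1 := by omega
  rw [PySem.List.slice_from l h1]
  have htn : (PySem.Chars.find l [c] + 1).toNat = (PySem.Chars.find l [c]).toNat + 1 := by omega
  rw [htn]
  apply pvDrop_first c l (PySem.Chars.find l [c]).toNat
  · exact pvSingleton_prefix.mp hpre
  · intro i hi hcon
    exact hmin i hi (pvSingleton_prefix.mpr hcon)

theorem pvStepB_mem {al rest : List Char} {c : Char} (h : c ∈ rest) (p : Int) :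
    pvStepB al (p, rest) c = (p, pvAfter c rest) := by
  obtain ⟨hs, hne⟩ := pvFind_mem (l := rest) h
  simp [pvStepB, hne, hs]

theorem pvStepB_not_mem {al rest : List Char} {c : Char} (h : c ∉ rest) (hal : c ∈ al) (p : Int) :
    pvStepB al (p, rest) c = (p + 1, pvAfter c al) := by
  obtain ⟨hs, _⟩ := pvFind_mem (l := al) hal
  simp [pvStepB, pvFind_not_mem h, hs]

-- B's fold counts exactly pvSpec extra passes
theorem pvFoldB_eq (al : List Char) : ∀ (f : List Char) (p : Int) (rest : List Char),
    (∀ c ∈ f, c ∈ al) →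
    (f.foldl (pvStepB al) (p, rest)).1 = p + (pvSpec al f rest : Int) := by
  intro f
  induction f with
  | nil => intro p rest _; simp [pvSpec]
  | cons c ft ih =>
      intro p rest hall
      have hca : c ∈ al := hall c List.mem_cons_self
      have hall' : ∀ x ∈ ft, x ∈ al := fun x hx => hall x (List.mem_cons_of_mem _ hx)
      by_cases hc : c ∈ rest
      · rw [List.foldl_cons, pvStepB_mem hc, ih _ _ hall']
        simp [pvSpec, hc]
      · rw [List.foldl_cons, pvStepB_not_mem hc hca, ih _ _ hall']
        simp only [pvSpec, hc, reduceIte]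
        push_cast
        ring

-- ===== VERDICT (by name: the statement is the Claim_ definition above) =====
theorem string_constructing_spec : Claim_equal_string_constructing := by
  intro a s _hdom hpre
  unfold Spec_string_constructing string_constructing string_constructing_alt
  by_cases hs : s.toList = []
  · simp [hs, pvWhileA]
  · have hall : ∀ c ∈ s.toList, c ∈ a.toList := by
      have hpre' := hpre
      unfold Pre_string_constructing at hpre'
      simpa using hpre'
    rw [pvWhileA_eq a.toList s.toList.length s.toList 0 hall le_rfl]
    have hfold := pvFoldB_eq a.toList s.toList 1 a.toList hall
    simp only [hfold, if_neg hs]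
    ring
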